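-- pv_equiv track=rewrite | github.com/devill/aoc | 2023/day22.py | calculate_dependencies
-- ===== SOURCE A (Python) =====
-- def dependency_distance(lower, upper):
--     # Unpack the coordinates of the lower and upper bricks
--     (lower_x1, lower_y1, lower_z1), (lower_x2, lower_y2, lower_z2) = lower
--     (upper_x1, upper_y1, upper_z1), (upper_x2, upper_y2, upper_z2) = upper
--
--     # Check if the bricks are aligned vertically
--     if (upper_x1 <= lower_x2 and lower_x1 <= upper_x2) and (upper_y1 <= lower_y2 and lower_y1 <= upper_y2):
--         return upper_z1 - lower_z2 - 1  # Distance between the two bricks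
--     return None  # No dependency if the bricks are not vertically aligned
--
-- def calculate_dependencies(bricks):
--     dependencies = []
--     for i, upper_brick in enumerate(bricks):
--         # Initialize dependency map for each brick
--         dependency_map = {-1: upper_brick[0][2] - 1}  # Dependency on the ground
--         for j, lower_brick in enumerate(bricks):
--             if i == j:
--                 continue  # Skip self-dependency
--             distance = dependency_distance(lower_brick, upper_brick)
--             if distance is not None and distance >= 0:
--                 dependency_map[j] = distance
--         dependencies.append(dependency_map)
--     return dependencies
-- ===== SOURCE B (Python) =====
-- def calculate_dependencies(bricks):
--     def overlap(a, b):
--         return (b[0][0] <= a[1][0] and a[0][0] <= b[1][0]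
--                 and b[0][1] <= a[1][1] and a[0][1] <= b[1][1])
--
--     def entry(lower, upper, j):
--         # dependency entry of `upper` on `lower` (at original index j), if any
--         d = upper[0][2] - lower[1][2] - 1
--         return [(j, d)] if overlap(lower, upper) and d >= 0 else []
--
--     def go(rest, i):
--         # dependency rows (without the ground entries) for rest = bricks[i:],
--         # handling each pair at the topmost recursion level where both occur
--         if not rest:
--             return []
--         head, tail = rest[0], rest[1:]
--         head_row = [e for k, other in enumerate(tail) for e in entry(other, head, i + 1 + k)]
--         rows = [entry(head, other, i) + row for other, row in zip(tail, go(tail, i + 1))]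
--         return [head_row] + rows
--
--     return [dict([(-1, b[0][2] - 1)] + row) for b, row in zip(bricks, go(bricks, 0))]
-- ===== Notes on version B (the rewrite author's own statement) =====
-- stated objective: alternative
-- what changed: B replaces A's full n×n double enumerate with a skip-self check by a structural recursion on the brick list that handles each brick pair once at the topmost recursion level where both occur, building the head's row by a comprehension over the tail and threading the reverse-direction entries into the tail's rows with zip.
import Mathlib
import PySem

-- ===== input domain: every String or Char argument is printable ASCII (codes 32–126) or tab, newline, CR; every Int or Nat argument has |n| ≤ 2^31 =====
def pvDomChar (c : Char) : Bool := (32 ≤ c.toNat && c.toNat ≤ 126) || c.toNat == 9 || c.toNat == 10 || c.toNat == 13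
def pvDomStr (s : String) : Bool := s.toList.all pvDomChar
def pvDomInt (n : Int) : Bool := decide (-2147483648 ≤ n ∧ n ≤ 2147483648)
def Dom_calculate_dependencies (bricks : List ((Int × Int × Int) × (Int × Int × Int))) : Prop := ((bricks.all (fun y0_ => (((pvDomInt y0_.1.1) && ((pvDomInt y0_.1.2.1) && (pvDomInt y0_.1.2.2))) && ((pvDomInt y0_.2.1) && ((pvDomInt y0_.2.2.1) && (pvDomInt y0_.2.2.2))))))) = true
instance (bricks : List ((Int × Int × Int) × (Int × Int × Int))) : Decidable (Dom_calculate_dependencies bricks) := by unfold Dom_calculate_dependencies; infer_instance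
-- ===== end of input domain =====

-- B recurses on the brick list, pairing each brick with every later one at the topmost
-- recursion level where both occur, instead of A's full n×n double enumerate with a
-- skip-self check; same asymptotic cost (objective: alternative decomposition).

-- ===== PORT A =====
def dependency_distance (lower upper : (Int × Int × Int) × (Int × Int × Int)) : Option Int :=
  if upper.1.1 ≤ lower.2.1 ∧ lower.1.1 ≤ upper.2.1 ∧ upper.1.2.1 ≤ lower.2.2.1 ∧ lower.1.2.1 ≤ upper.2.2.1 then
    some (upper.1.2.2 - lower.2.2.2 - 1)
  else
    none

def calculate_dependencies (bricks : List ((Int × Int × Int) × (Int × Int × Int))) : List (List (Int × Int)) :=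
  (PySem.List.enumerate bricks 0).foldl (fun dependencies iu =>
    let dependency_map : PySem.Dict Int Int :=
      (PySem.List.enumerate bricks 0).foldl (fun dm jl =>
        if iu.1 = jl.1 then dm
        else
          match dependency_distance jl.2 iu.2 with
          | some dist => if dist ≥ 0 then dm.insert jl.1 dist else dm
          | none => dm)
        (PySem.Dict.ofList [(-1, iu.2.1.2.2 - 1)])
    dependencies ++ [dependency_map.items]) []

-- ===== PORT B =====
def pvOverlap (a b : (Int × Int × Int) × (Int × Int × Int)) : Bool :=
  decide (b.1.1 ≤ a.2.1) && decide (a.1.1 ≤ b.2.1) && decide (b.1.2.1 ≤ a.2.2.1) && decide (a.1.2.1 ≤ b.2.2.1)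

def pvEntry (lower upper : (Int × Int × Int) × (Int × Int × Int)) (j : Int) : List (Int × Int) :=
  let d := upper.1.2.2 - lower.2.2.2 - 1
  if pvOverlap lower upper && decide (d ≥ 0) then [(j, d)] else []

def pvGo : List ((Int × Int × Int) × (Int × Int × Int)) → Int → List (List (Int × Int))
  | [], _ => []
  | head :: tail, i =>
    let head_row := (PySem.List.enumerate tail 0).flatMap (fun ko => pvEntry ko.2 head (i + 1 + ko.1))
    let rows := List.zipWith (fun other row => pvEntry head other i ++ row) tail (pvGo tail (i + 1))
    head_row :: rows

def calculate_dependencies_alt (bricks : List ((Int × Int × Int) × (Int × Int × Int))) : List (List (Int × Int)) :=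
  List.zipWith (fun b row => (PySem.Dict.ofList ((-1, b.1.2.2 - 1) :: row)).items) bricks (pvGo bricks 0)

-- ===== PRECONDITION & SPEC =====
def Spec_calculate_dependencies (bricks : List ((Int × Int × Int) × (Int × Int × Int))) (out : List (List (Int × Int))) : Prop := out = calculate_dependencies_alt bricks
instance (bricks : List ((Int × Int × Int) × (Int × Int × Int))) (out : List (List (Int × Int))) : Decidable (Spec_calculate_dependencies bricks out) := by unfold Spec_calculate_dependencies; infer_instance

-- ===== CLAIM (what is proved, stated in full; the proofs are below) =====
def Claim_equal_calculate_dependencies : Prop := ∀ (bricks : List ((Int × Int × Int) × (Int × Int × Int))), Dom_calculate_dependencies bricks → Spec_calculate_dependencies bricks (calculate_dependencies bricks)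

-- ===== LEMMAS AND PROOFS =====

def pvKeep (lower upper : (Int × Int × Int) × (Int × Int × Int)) : Bool :=
  pvOverlap lower upper && decide (upper.1.2.2 - lower.2.2.2 - 1 ≥ 0)

def pvDval (lower upper : (Int × Int × Int) × (Int × Int × Int)) : Int :=
  upper.1.2.2 - lower.2.2.2 - 1

-- common row specification: entries of brick ub (local index k in bs) against all of bs,
-- global indices offset by i0
def rowSpec (bs : List ((Int × Int × Int) × (Int × Int × Int))) (i0 k : Int)
    (ub : (Int × Int × Int) × (Int × Int × Int)) : List (Int × Int) :=
  ((PySem.List.enumerate bs 0).filter (fun jl => decide (jl.1 ≠ k) && pvKeep jl.2 ub)).map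
    (fun jl => (i0 + jl.1, pvDval jl.2 ub))

theorem pvOverlap_iff (a b : (Int × Int × Int) × (Int × Int × Int)) :
    pvOverlap a b = true ↔ (b.1.1 ≤ a.2.1 ∧ a.1.1 ≤ b.2.1 ∧ b.1.2.1 ≤ a.2.2.1 ∧ a.1.2.1 ≤ b.2.2.1) := by
  simp [pvOverlap, and_assoc]

theorem pvEntry_eq (lower upper : (Int × Int × Int) × (Int × Int × Int)) (j : Int) :
    pvEntry lower upper j = if pvKeep lower upper then [(j, pvDval lower upper)] else [] := rfl

theorem enumerate_shift {α : Type} (t : List α) (s : Int) :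
    PySem.List.enumerate t (s + 1) = (PySem.List.enumerate t s).map (fun p => (p.1 + 1, p.2)) := by
  induction t generalizing s with
  | nil => simp [PySem.List.enumerate_nil]
  | cons h t ih =>
    rw [PySem.List.enumerate_cons, PySem.List.enumerate_cons]
    simp only [List.map_cons]
    rw [ih (s + 1)]

theorem fst_nonneg_of_mem_enumerate {α : Type} {t : List α} {p : Int × α}
    (h : p ∈ PySem.List.enumerate t 0) : 0 ≤ p.1 := by
  rcases (PySem.List.mem_enumerate_iff t 0 p).1 h with ⟨k, hk, rfl⟩
  simp

theorem zipWith_map_enumerate {α β γ : Type} (t : List α) (g : α → β → γ)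
    (f : Int × α → β) (s : Int) :
    List.zipWith g t ((PySem.List.enumerate t s).map f)
      = (PySem.List.enumerate t s).map (fun p => g p.2 (f p)) := by
  induction t generalizing s with
  | nil => simp [PySem.List.enumerate_nil]
  | cons h t ih =>
    rw [PySem.List.enumerate_cons]
    simp only [List.map_cons, List.zipWith_cons_cons]
    rw [ih (s + 1)]

theorem flatMap_if_singleton {α β : Type} (l : List α) (c : α → Bool) (g : α → β) :
    l.flatMap (fun a => if c a then [g a] else []) = (l.filter c).map g := by
  induction l with
  | nil => simp
  | cons h t ih =>
    by_cases hc : c h <;> simp [hc, ih]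

theorem foldl_condInsert {β : Type} (l : List β) (c : β → Bool) (k : β → Int) (v : β → Int)
    (d : PySem.Dict Int Int) :
    l.foldl (fun dm a => if c a then dm.insert (k a) (v a) else dm) d
      = (l.filter c).foldl (fun dm a => dm.insert (k a) (v a)) d := by
  induction l generalizing d with
  | nil => rfl
  | cons h t ih =>
    by_cases hc : c h <;> simp [hc, ih]

theorem nodup_filter_enumerate_fst {α : Type} (t : List α) (s : Int) (c : Int × α → Bool) :
    (((PySem.List.enumerate t s).filter c).map (fun p => p.1)).Nodup := by
  have hp : ((PySem.List.enumerate t s).filter c).Pairwise (fun p q => p.1 < q.1) :=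
    (PySem.List.pairwise_lt_enumerate t s).sublist List.filter_sublist
  exact (List.pairwise_map).2 (hp.imp (fun h => Int.ne_of_lt h))

-- the row list (-1, g) :: rowSpec bs 0 k ub has pairwise distinct keys, so dict() keeps it
theorem items_ofList_row (bs : List ((Int × Int × Int) × (Int × Int × Int))) (k g : Int)
    (ub : (Int × Int × Int) × (Int × Int × Int)) :
    (PySem.Dict.ofList ((-1, g) :: rowSpec bs 0 k ub)).items = (-1, g) :: rowSpec bs 0 k ub := by
  have hmap : (rowSpec bs 0 k ub).map Prod.fst
      = ((PySem.List.enumerate bs 0).filter (fun jl => decide (jl.1 ≠ k) && pvKeep jl.2 ub)).map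
          (fun p => p.1) := by
    simp only [rowSpec, List.map_map]
    apply List.map_congr_left
    intro q _
    simp [Function.comp]
  have hnodup : (((-1, g) :: rowSpec bs 0 k ub).map Prod.fst).Nodup := by
    rw [List.map_cons, hmap]
    refine List.nodup_cons.2 ⟨?_, nodup_filter_enumerate_fst bs 0 _⟩
    intro hmem
    rcases List.mem_map.1 hmem with ⟨q, hq, heq⟩
    have h0 : 0 ≤ q.1 := fst_nonneg_of_mem_enumerate (List.mem_of_mem_filter hq)
    omega
  have h := PySem.Dict.items_foldl_insert_fresh ((-1, g) :: rowSpec bs 0 k ub)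
    Prod.fst Prod.snd PySem.Dict.empty (fun a _ => by simp) hnodup
  calc (PySem.Dict.ofList ((-1, g) :: rowSpec bs 0 k ub)).items
      = (List.foldl (fun d a => d.insert (Prod.fst a) (Prod.snd a)) PySem.Dict.empty
          ((-1, g) :: rowSpec bs 0 k ub)).items := rfl
    _ = PySem.Dict.empty.items ++ List.map (fun a => (Prod.fst a, Prod.snd a)) ((-1, g) :: rowSpec bs 0 k ub) := h
    _ = (-1, g) :: rowSpec bs 0 k ub := by
        rw [show PySem.Dict.empty.items = ([] : List (Int × Int)) from rfl]
        simp

-- A's inner loop computes (-1, z1-1) :: rowSpec bricks 0 i ub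
theorem rowA (bricks : List ((Int × Int × Int) × (Int × Int × Int))) (i : Int)
    (ub : (Int × Int × Int) × (Int × Int × Int)) :
    ((PySem.List.enumerate bricks 0).foldl (fun dm jl =>
        if i = jl.1 then dm
        else
          match dependency_distance jl.2 ub with
          | some dist => if dist ≥ 0 then dm.insert jl.1 dist else dm
          | none => dm)
      (PySem.Dict.ofList [(-1, ub.1.2.2 - 1)])).items
      = (-1, ub.1.2.2 - 1) :: rowSpec bricks 0 i ub := by
  have hstep : (fun (dm : PySem.Dict Int Int) (jl : Int × ((Int × Int × Int) × (Int × Int × Int))) =>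
      if i = jl.1 then dm
      else
        match dependency_distance jl.2 ub with
        | some dist => if dist ≥ 0 then dm.insert jl.1 dist else dm
        | none => dm)
      = (fun dm jl =>
        if (decide (jl.1 ≠ i) && pvKeep jl.2 ub) then dm.insert jl.1 (pvDval jl.2 ub) else dm) := by
    funext dm jl
    by_cases hij : i = jl.1
    · subst hij
      simp
    · have hji : jl.1 ≠ i := fun h => hij h.symm
      rw [if_neg hij]
      unfold dependency_distance
      by_cases hov : ub.1.1 ≤ jl.2.2.1 ∧ jl.2.1.1 ≤ ub.2.1 ∧ ub.1.2.1 ≤ jl.2.2.2.1 ∧ jl.2.1.2.1 ≤ ub.2.2.1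
      · rw [if_pos hov]
        have hovb : pvOverlap jl.2 ub = true := (pvOverlap_iff jl.2 ub).2 hov
        by_cases hd : ub.1.2.2 - jl.2.2.2.2 - 1 ≥ 0
        · simp [pvKeep, pvDval, hovb, hji]
        · simp [pvKeep, pvDval, hovb]
          split_ifs <;> first | rfl | omega
      · rw [if_neg hov]
        have hovb : pvOverlap jl.2 ub = false := by
          rw [Bool.eq_false_iff]
          intro hb
          exact hov ((pvOverlap_iff jl.2 ub).1 hb)
        simp [pvKeep, hovb]
  rw [hstep]
  rw [foldl_condInsert (PySem.List.enumerate bricks 0)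
    (fun jl => decide (jl.1 ≠ i) && pvKeep jl.2 ub) (fun jl => jl.1) (fun jl => pvDval jl.2 ub)]
  have h := PySem.Dict.items_foldl_insert_fresh
    ((PySem.List.enumerate bricks 0).filter (fun jl => decide (jl.1 ≠ i) && pvKeep jl.2 ub))
    (fun jl => jl.1) (fun jl => pvDval jl.2 ub) (PySem.Dict.ofList [(-1, ub.1.2.2 - 1)])
    (by
      intro a ha
      have h0 : 0 ≤ a.1 := fst_nonneg_of_mem_enumerate (List.mem_of_mem_filter ha)
      have hitems : (PySem.Dict.ofList [((-1 : Int), ub.1.2.2 - 1)]).items = [(-1, ub.1.2.2 - 1)] := rfl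
      simp [PySem.Dict.contains, hitems]
      omega)
    (nodup_filter_enumerate_fst bricks 0 _)
  refine (Eq.trans h ?_)
  have hitems : (PySem.Dict.ofList [((-1 : Int), ub.1.2.2 - 1)]).items = [(-1, ub.1.2.2 - 1)] := rfl
  rw [hitems]
  simp [rowSpec]

-- cons-step characterisations of rowSpec
theorem rowSpec_cons_self (h : (Int × Int × Int) × (Int × Int × Int))
    (t : List ((Int × Int × Int) × (Int × Int × Int))) (i0 : Int)
    (ub : (Int × Int × Int) × (Int × Int × Int)) :
    rowSpec (h :: t) i0 0 ub
      = ((PySem.List.enumerate t 0).filter (fun ko => pvKeep ko.2 ub)).map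
          (fun ko => (i0 + 1 + ko.1, pvDval ko.2 ub)) := by
  simp only [rowSpec]
  rw [PySem.List.enumerate_cons, List.filter_cons]
  rw [show (decide ((0 : Int) ≠ 0) && pvKeep h ub) = false by simp]
  rw [if_neg (by simp)]
  rw [enumerate_shift t 0, List.filter_map]
  have hfilter : ∀ q ∈ PySem.List.enumerate t 0,
      ((fun jl => decide (jl.1 ≠ 0) && pvKeep jl.2 ub) ∘ (fun p => (p.1 + 1, p.2))) q
        = (fun ko => pvKeep ko.2 ub) q := by
    intro q hq
    have h0 : 0 ≤ q.1 := fst_nonneg_of_mem_enumerate hq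
    have : (q.1 + 1 ≠ 0) := by omega
    simp [Function.comp, this]
  rw [List.filter_congr hfilter, List.map_map]
  apply List.map_congr_left
  intro jl _
  simp [Function.comp]
  ring

theorem rowSpec_cons_succ (h : (Int × Int × Int) × (Int × Int × Int))
    (t : List ((Int × Int × Int) × (Int × Int × Int))) (i0 k : Int)
    (ub : (Int × Int × Int) × (Int × Int × Int)) (hk : 0 ≤ k) :
    rowSpec (h :: t) i0 (k + 1) ub = pvEntry h ub i0 ++ rowSpec t (i0 + 1) k ub := by
  simp only [rowSpec]
  rw [PySem.List.enumerate_cons, List.filter_cons]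
  rw [show (decide ((0 : Int) ≠ k + 1) && pvKeep h ub) = pvKeep h ub by simp; omega]
  rw [enumerate_shift t 0, List.filter_map]
  have hiff : ∀ q : Int × ((Int × Int × Int) × (Int × Int × Int)), (q.1 + 1 ≠ k + 1) ↔ (q.1 ≠ k) := by
    intro q; omega
  have hfilter : ∀ q ∈ PySem.List.enumerate t 0,
      ((fun jl => decide (jl.1 ≠ k + 1) && pvKeep jl.2 ub) ∘ (fun p => (p.1 + 1, p.2))) q
        = (fun q => decide (q.1 ≠ k) && pvKeep q.2 ub) q := by
    intro q _
    simp [Function.comp, hiff q]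
  have htail : (((PySem.List.enumerate t 0).filter
        ((fun jl => decide (jl.1 ≠ k + 1) && pvKeep jl.2 ub) ∘ (fun p => (p.1 + 1, p.2)))).map
        ((fun jl => (i0 + jl.1, pvDval jl.2 ub)) ∘ (fun p => (p.1 + 1, p.2))))
      = rowSpec t (i0 + 1) k ub := by
    rw [List.filter_congr hfilter]
    simp only [rowSpec]
    apply List.map_congr_left
    intro q _
    simp [Function.comp]
    ring
  by_cases hkp : pvKeep h ub
  · rw [if_pos hkp, pvEntry_eq, if_pos hkp]
    simp only [List.map_cons, List.map_map, List.cons_append, List.nil_append, add_zero]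
    rw [htail]
    simp only [rowSpec]
  · rw [if_neg (by simp [hkp]), pvEntry_eq, if_neg hkp]
    simp only [List.map_map, List.nil_append]
    rw [htail]
    simp only [rowSpec]

-- B's recursion computes rowSpec rows
theorem pvGo_spec (bs : List ((Int × Int × Int) × (Int × Int × Int))) (i0 : Int) :
    pvGo bs i0 = (PySem.List.enumerate bs 0).map (fun p => rowSpec bs i0 p.1 p.2) := by
  induction bs generalizing i0 with
  | nil => simp [pvGo, PySem.List.enumerate_nil]
  | cons h t ih =>
    rw [pvGo]
    rw [PySem.List.enumerate_cons]
    simp only [List.map_cons]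
    congr 1
    · -- head row
      rw [rowSpec_cons_self]
      rw [← flatMap_if_singleton (PySem.List.enumerate t 0) (fun ko => pvKeep ko.2 h)
        (fun ko => (i0 + 1 + ko.1, pvDval ko.2 h))]
      simp only [pvEntry_eq]
    · -- tail rows
      rw [ih (i0 + 1)]
      rw [zipWith_map_enumerate]
      rw [enumerate_shift t 0, List.map_map]
      apply List.map_congr_left
      intro p hp
      have hp0 : 0 ≤ p.1 := fst_nonneg_of_mem_enumerate hp
      simp only [Function.comp]
      exact (rowSpec_cons_succ h t i0 p.1 p.2 hp0).symm

theorem foldl_append_singleton {α β : Type} (l : List α) (f : α → β) :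
    l.foldl (fun acc x => acc ++ [f x]) [] = l.map f := by
  have key : ∀ (l : List α) (acc : List β), l.foldl (fun acc x => acc ++ [f x]) acc = acc ++ l.map f := by
    intro l
    induction l with
    | nil => intro acc; simp
    | cons h t ih => intro acc; simp [ih]
  simpa using key l []

-- ===== VERDICT (by name: the statement is the Claim_ definition above) =====
theorem calculate_dependencies_spec : Claim_equal_calculate_dependencies := by
  intro bricks _
  unfold Spec_calculate_dependencies
  have hA : calculate_dependencies bricks
      = (PySem.List.enumerate bricks 0).map (fun iu =>
          ((PySem.List.enumerate bricks 0).foldl (fun dm jl =>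
            if iu.1 = jl.1 then dm
            else
              match dependency_distance jl.2 iu.2 with
              | some dist => if dist ≥ 0 then dm.insert jl.1 dist else dm
              | none => dm)
            (PySem.Dict.ofList [(-1, iu.2.1.2.2 - 1)])).items) := by
    unfold calculate_dependencies
    exact foldl_append_singleton (PySem.List.enumerate bricks 0) _
  rw [hA]
  unfold calculate_dependencies_alt
  rw [pvGo_spec bricks 0, zipWith_map_enumerate]
  apply List.map_congr_left
  intro p _
  rw [rowA bricks p.1 p.2, items_ofList_row]
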